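-- pv_equiv track=rewrite | github.com/wilmurillo-ai/Design-Assistant | .skills/openclaw-skills/skills/onlyonepice/openviking-context/scripts/demo-token-compare.py | simulate_l1_overview
-- ===== SOURCE A (Python) =====
-- def simulate_l1_overview(content: str) -> str:
--     """模拟 L1 概览 — 提取标题和首段，限制约 2000 字符"""
--     lines = content.strip().splitlines()
--     overview_parts = []
--     total_chars = 0
--     in_code_block = False
--
--     for line in lines:
--         if line.strip().startswith("```"):
--             in_code_block = not in_code_block
--             continue
--         if in_code_block:
--             continue
--
--         if line.startswith("#"):
--             overview_parts.append(line)
--             total_chars += len(line)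
--         elif line.strip() and total_chars < 2000:
--             overview_parts.append(line)
--             total_chars += len(line)
--
--         if total_chars >= 2000:
--             break
--
--     return "\n".join(overview_parts)
-- ===== SOURCE B (Python) =====
-- def _collect(lines, budget):
--     """Recursively collect overview lines with a shrinking character budget.
--     A fence line makes us jump past the matching closing fence (no flag)."""
--     if not lines:
--         return []
--     head, rest = lines[0], lines[1:]
--     if head.strip().startswith("```"):
--         for j, l in enumerate(rest):
--             if l.strip().startswith("```"):
--                 return _collect(rest[j + 1:], budget)
--         return []
--     if head.startswith("#") or head.strip():
--         remaining = budget - len(head)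
--         if remaining <= 0:
--             return [head]
--         return [head] + _collect(rest, remaining)
--     return _collect(rest, budget)
--
--
-- def simulate_l1_overview(content: str) -> str:
--     return "\n".join(_collect(content.strip().splitlines(), 2000))
-- ===== Notes on version B (the rewrite author's own statement) =====
-- stated objective: alternative
-- what changed: A's single stateful loop (append-list accumulator, running total, in_code_block flag, break) becomes a recursive collector carrying only a shrinking character budget, where a fence line jumps past the whole code block by scanning for the matching fence instead of toggling a flag.
import Mathlib
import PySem

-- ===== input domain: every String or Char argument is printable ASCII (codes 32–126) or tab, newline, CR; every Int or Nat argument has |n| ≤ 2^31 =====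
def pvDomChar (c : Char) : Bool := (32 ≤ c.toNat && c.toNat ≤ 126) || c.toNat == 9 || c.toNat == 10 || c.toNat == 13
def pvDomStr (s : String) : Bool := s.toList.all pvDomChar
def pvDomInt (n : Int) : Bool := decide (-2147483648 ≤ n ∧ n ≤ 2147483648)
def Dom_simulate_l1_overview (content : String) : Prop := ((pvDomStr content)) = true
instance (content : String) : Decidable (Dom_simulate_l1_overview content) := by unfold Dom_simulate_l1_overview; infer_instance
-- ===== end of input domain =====

-- B replaces A's single flag-and-accumulator loop by a recursion with a shrinking character
-- budget that jumps past whole code blocks; same return value, no speed claim.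

-- ===== PORT A =====
-- the single for-loop of A: state = (overview_parts, total_chars, in_code_block); 'break' = return parts
def pvLoopA : List String → List String → Int → Bool → List String
  | [], parts, _, _ => parts
  | l :: rest, parts, total, icb =>
    if PySem.Str.startswith (PySem.Str.strip l) "```" = true then
      pvLoopA rest parts total (!icb)
    else if icb = true then
      pvLoopA rest parts total icb
    else
      let st :=
        if PySem.Str.startswith l "#" = true then
          (parts ++ [l], total + (PySem.Str.len l : Int))
        else if PySem.Str.strip l ≠ "" ∧ total < 2000 then
          (parts ++ [l], total + (PySem.Str.len l : Int))
        else (parts, total)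
      if st.2 ≥ 2000 then st.1 else pvLoopA rest st.1 st.2 icb

def simulate_l1_overview (content : String) : String :=
  PySem.Str.join "\n" (pvLoopA (PySem.Str.splitlines (PySem.Str.strip content)) [] 0 false)

-- ===== PORT B =====
-- B's inner 'for j, l in enumerate(rest): if fence: return _collect(rest[j+1:], budget)' /
-- 'return []' — the scan-and-slice is transcribed as this structural scan (exact: rest[j+1:]
-- after the first fence at j is the suffix after that fence; no fence means []).
def pvSkipFence : List String → List String
  | [] => []
  | l :: rest =>
    if PySem.Str.startswith (PySem.Str.strip l) "```" = true then rest
    else pvSkipFence rest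

theorem pvSkipFence_length_le (ls : List String) : (pvSkipFence ls).length ≤ ls.length := by
  induction ls with
  | nil => simp [pvSkipFence]
  | cons l rest ih =>
    simp only [pvSkipFence]
    split_ifs
    · simp
    · simpa using Nat.le_succ_of_le ih

-- B's _collect: recursion with a shrinking budget; a fence line jumps past the code block
def pvCollect : List String → Int → List String
  | [], _ => []
  | head :: rest, budget =>
    if PySem.Str.startswith (PySem.Str.strip head) "```" = true then
      pvCollect (pvSkipFence rest) budget
    else if PySem.Str.startswith head "#" = true ∨ PySem.Str.strip head ≠ "" then
      let remaining := budget - (PySem.Str.len head : Int)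
      if remaining ≤ 0 then [head]
      else head :: pvCollect rest remaining
    else pvCollect rest budget
termination_by ls _ => ls.length
decreasing_by
  · exact Nat.lt_succ_of_le (pvSkipFence_length_le rest)
  · exact Nat.lt_succ_self _
  · exact Nat.lt_succ_self _

def simulate_l1_overview_alt (content : String) : String :=
  PySem.Str.join "\n" (pvCollect (PySem.Str.splitlines (PySem.Str.strip content)) 2000)

-- ===== PRECONDITION & SPEC =====
def Spec_simulate_l1_overview (content : String) (out : String) : Prop := out = simulate_l1_overview_alt content
instance (content : String) (out : String) : Decidable (Spec_simulate_l1_overview content out) := by unfold Spec_simulate_l1_overview; infer_instance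

-- ===== CLAIM (what is proved, stated in full; the proofs are below) =====
def Claim_equal_simulate_l1_overview : Prop := ∀ (content : String), Dom_simulate_l1_overview content → Spec_simulate_l1_overview content (simulate_l1_overview content)

-- ===== LEMMAS AND PROOFS =====

-- A's loop in code-block state skips lines until the closing fence: exactly B's fence jump
theorem pvLoopA_icb (ls : List String) (parts : List String) (total : Int) :
    pvLoopA ls parts total true = pvLoopA (pvSkipFence ls) parts total false := by
  induction ls with
  | nil => rfl
  | cons l rest ih =>
    simp only [pvLoopA, pvSkipFence]
    split_ifs with hf
    · rfl
    · exact ih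

-- loop invariant: total_chars < 2000 at the top of every iteration, so A's loop appends
-- exactly B's recursive collection with budget 2000 - total
theorem pvLoopA_eq (n : Nat) : ∀ (ls : List String), ls.length ≤ n →
    ∀ (parts : List String) (total : Int), total < 2000 →
      pvLoopA ls parts total false = parts ++ pvCollect ls (2000 - total) := by
  induction n with
  | zero =>
    intro ls hls parts total _
    have : ls = [] := List.eq_nil_of_length_eq_zero (Nat.le_zero.mp hls)
    subst this; simp [pvLoopA, pvCollect]
  | succ n ih =>
    intro ls hls parts total htot
    match ls with
    | [] => simp [pvLoopA, pvCollect]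
    | l :: rest =>
      simp only [List.length_cons, Nat.succ_le_succ_iff] at hls
      by_cases hf : PySem.Str.startswith (PySem.Str.strip l) "```" = true
      · simp only [pvLoopA, pvCollect, if_pos hf, Bool.not_false]
        rw [pvLoopA_icb]
        exact ih _ (le_trans (pvSkipFence_length_le rest) hls) parts total htot
      · simp only [pvLoopA, pvCollect, if_neg hf]
        rw [if_neg (by simp : ¬((false : Bool) = true))]
        by_cases hk : PySem.Str.startswith l "#" = true ∨ PySem.Str.strip l ≠ ""
        · rw [if_pos hk]
          have hst : (if PySem.Str.startswith l "#" = true then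
                (parts ++ [l], total + (PySem.Str.len l : Int))
              else if PySem.Str.strip l ≠ "" ∧ total < 2000 then
                (parts ++ [l], total + (PySem.Str.len l : Int))
              else (parts, total)) = (parts ++ [l], total + (PySem.Str.len l : Int)) := by
            by_cases hh : PySem.Str.startswith l "#" = true
            · rw [if_pos hh]
            · rw [if_neg hh, if_pos (And.intro (hk.resolve_left hh) htot)]
          rw [hst]
          by_cases hb : total + (PySem.Str.len l : Int) ≥ 2000
          · rw [if_pos hb, if_pos (by omega : (2000 : Int) - total - (PySem.Str.len l : Int) ≤ 0)]
          · rw [if_neg hb,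
              if_neg (by omega : ¬ ((2000 : Int) - total - (PySem.Str.len l : Int) ≤ 0))]
            rw [ih rest hls _ _ (by omega)]
            rw [show (2000 : Int) - (total + (PySem.Str.len l : Int))
                = 2000 - total - (PySem.Str.len l : Int) from by ring]
            simp
        · rw [if_neg hk]
          have hst : (if PySem.Str.startswith l "#" = true then
                (parts ++ [l], total + (PySem.Str.len l : Int))
              else if PySem.Str.strip l ≠ "" ∧ total < 2000 then
                (parts ++ [l], total + (PySem.Str.len l : Int))
              else (parts, total)) = (parts, total) := by
            rw [if_neg (fun h => hk (Or.inl h)), if_neg (fun h => hk (Or.inr h.1))]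
          rw [hst]
          rw [if_neg (by omega : ¬ (total ≥ 2000))]
          exact ih rest hls parts total htot

-- ===== VERDICT (by name: the statement is the Claim_ definition above) =====
theorem simulate_l1_overview_spec : Claim_equal_simulate_l1_overview := by
  intro content _
  unfold Spec_simulate_l1_overview simulate_l1_overview simulate_l1_overview_alt
  rw [pvLoopA_eq _ _ (le_refl _) _ _ (by norm_num)]
  norm_num
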